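-- pv_equiv track=rewrite | github.com/Tushar-9802/llmclean | llmclean/json_utils.py | _close_open_structures
-- ===== SOURCE A (Python) =====
-- def _close_open_structures(text: str) -> str:
--     """Append any missing closing } or ] characters."""
--     stack = []
--     in_string = False
--     escape_next = False
--     pairs = {"{": "}", "[": "]"}
--     closers = set(pairs.values())
--
--     for ch in text:
--         if escape_next:
--             escape_next = False
--             continue
--         if ch == "\\" and in_string:
--             escape_next = True
--             continue
--         if ch == '"':
--             in_string = not in_string
--             continue
--         if in_string:
--             continue
--         if ch in pairs:
--             stack.append(pairs[ch])
--         elif ch in closers: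
--             if stack and stack[-1] == ch:
--                 stack.pop()
--
--     # Append missing closers in reverse order
--     return text + "".join(reversed(stack))
-- ===== SOURCE B (Python) =====
-- def _close_open_structures(text: str) -> str:
--     """Append any missing closing } or ] characters."""
--     # Pass 1: collect only structural bracket characters outside string literals.
--     brackets = []
--     in_string = False
--     escape_next = False
--     for ch in text:
--         if escape_next:
--             escape_next = False
--         elif ch == "\\" and in_string:
--             escape_next = True
--         elif ch == '"':
--             in_string = not in_string
--         elif in_string:
--             pass
--         elif ch in "{[]}":
--             brackets.append(ch)
--     # Pass 2: match brackets with a fresh stack.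
--     stack = []
--     for ch in brackets:
--         if ch == "{":
--             stack.append("}")
--         elif ch == "[":
--             stack.append("]")
--         elif stack and stack[-1] == ch:
--             stack.pop()
--     return text + "".join(reversed(stack))
-- ===== Notes on version B (the rewrite author's own statement) =====
-- stated objective: alternative
-- what changed: Single fused scan carrying stack+string-state is split into two passes: one pass filters the structural bracket characters outside string literals, a second pass runs the matching stack over that filtered sequence.
import Mathlib
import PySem

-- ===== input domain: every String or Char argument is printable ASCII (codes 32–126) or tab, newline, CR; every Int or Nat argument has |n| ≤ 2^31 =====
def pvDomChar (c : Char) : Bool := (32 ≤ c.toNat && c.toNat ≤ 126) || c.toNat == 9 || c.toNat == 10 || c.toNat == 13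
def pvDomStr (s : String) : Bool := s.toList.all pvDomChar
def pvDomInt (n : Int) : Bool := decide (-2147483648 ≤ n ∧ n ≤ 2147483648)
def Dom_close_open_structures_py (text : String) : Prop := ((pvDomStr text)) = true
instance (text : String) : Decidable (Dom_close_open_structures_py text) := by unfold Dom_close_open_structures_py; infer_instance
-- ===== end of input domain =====

-- B replaces A's single fused scan by two passes (filter structural brackets, then match
-- with a fresh stack); objective: alternative decomposition, same cost.

-- ===== PORT A =====
-- state = (stack, in_string, escape_next); Python appends to / pops from the END of stack
def pvAStep (st : List Char × Bool × Bool) (ch : Char) : List Char × Bool × Bool :=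
  match st with
  | (stack, instr, esc) =>
    if esc then (stack, instr, false)
    else if ch = '\\' ∧ instr then (stack, instr, true)
    else if ch = '"' then (stack, !instr, esc)
    else if instr then (stack, instr, esc)
    else if ch = '{' then (stack ++ ['}'], instr, esc)
    else if ch = '[' then (stack ++ [']'], instr, esc)
    else if ch = '}' ∨ ch = ']' then
      (if stack.getLast? = some ch then stack.dropLast else stack, instr, esc)
    else (stack, instr, esc)

def close_open_structures_py (text : String) : String :=
  let res := text.toList.foldl pvAStep ([], false, false)
  text ++ String.ofList res.1.reverse

-- ===== PORT B =====
-- pass 1: (in_string, escape_next, collected brackets)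
def pvBCollect (st : Bool × Bool × List Char) (ch : Char) : Bool × Bool × List Char :=
  match st with
  | (instr, esc, acc) =>
    if esc then (instr, false, acc)
    else if ch = '\\' ∧ instr then (instr, true, acc)
    else if ch = '"' then (!instr, esc, acc)
    else if instr then (instr, esc, acc)
    else if ch = '{' ∨ ch = '[' ∨ ch = ']' ∨ ch = '}' then (instr, esc, acc ++ [ch])
    else (instr, esc, acc)

-- pass 2: matching stack over the filtered bracket sequence
def pvBStack (stack : List Char) (ch : Char) : List Char :=
  if ch = '{' then stack ++ ['}']
  else if ch = '[' then stack ++ [']']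
  else if stack.getLast? = some ch then stack.dropLast
  else stack

def close_open_structures_py_alt (text : String) : String :=
  let brackets := (text.toList.foldl pvBCollect (false, false, [])).2.2
  let stack := brackets.foldl pvBStack []
  text ++ String.ofList stack.reverse

-- ===== PRECONDITION & SPEC =====
def Spec_close_open_structures_py (text : String) (out : String) : Prop := out = close_open_structures_py_alt text
instance (text : String) (out : String) : Decidable (Spec_close_open_structures_py text out) := by unfold Spec_close_open_structures_py; infer_instance

-- ===== CLAIM (what is proved, stated in full; the proofs are below) =====
def Claim_equal_close_open_structures_py : Prop := ∀ (text : String), Dom_close_open_structures_py text → Spec_close_open_structures_py text (close_open_structures_py text)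

-- ===== LEMMAS AND PROOFS =====

-- The fused scan's stack equals the matching stack run over the brackets collected so far.
theorem pv_key (cs : List Char) : ∀ (instr esc : Bool) (acc s0 : List Char),
    (cs.foldl pvAStep (acc.foldl pvBStack s0, instr, esc)).1
      = ((cs.foldl pvBCollect (instr, esc, acc)).2.2).foldl pvBStack s0 := by
  induction cs with
  | nil => intro instr esc acc s0; simp
  | cons ch cs ih =>
    intro instr esc acc s0
    simp only [List.foldl_cons]
    by_cases hesc : esc = true
    · simp [pvAStep, pvBCollect, hesc, ih]
    · simp only [Bool.not_eq_true] at hesc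
      subst hesc
      by_cases hbs : ch = '\\' ∧ instr = true
      · simp [pvAStep, pvBCollect, hbs, ih]
      · by_cases hq : ch = '"'
        · simp [pvAStep, pvBCollect, hq, ih]
        · by_cases hin : instr = true
          · have hch : ¬ ch = '\\' := fun h => hbs ⟨h, hin⟩
            simp [pvAStep, pvBCollect, hq, hch, hin, ih]
          · simp only [Bool.not_eq_true] at hin
            subst hin
            by_cases hbr : ch = '{' ∨ ch = '[' ∨ ch = ']' ∨ ch = '}'
            · have hb : pvBCollect (false, false, acc) ch = (false, false, acc ++ [ch]) := by
                simp [pvBCollect, hq, hbr]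
              have ha : pvAStep (acc.foldl pvBStack s0, false, false) ch
                  = (pvBStack (acc.foldl pvBStack s0) ch, false, false) := by
                rcases hbr with h | h | h | h <;> subst h <;> simp [pvAStep, pvBStack]
              rw [ha, hb, show pvBStack (acc.foldl pvBStack s0) ch
                    = (acc ++ [ch]).foldl pvBStack s0 by simp [List.foldl_append]]
              exact ih _ _ _ _
            · push Not at hbr
              obtain ⟨h1, h2, h3, h4⟩ := hbr
              simp [pvAStep, pvBCollect, hq, h1, h2, h3, h4, ih]

-- ===== VERDICT (by name: the statement is the Claim_ definition above) =====
theorem close_open_structures_py_spec : Claim_equal_close_open_structures_py := by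
  intro text _
  unfold Spec_close_open_structures_py close_open_structures_py close_open_structures_py_alt
  have h := pv_key text.toList false false [] []
  simp only [List.foldl_nil] at h
  exact congrArg (fun l : List Char => text ++ String.ofList l.reverse) h
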